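-- pv_equiv track=rewrite | github.com/vgaraujov/SentEval | examples/generate_visual_tasks.py | dataset_argmaxCharacter
-- ===== SOURCE A (Python) =====
-- from typing import Iterable, Union, List, Tuple, Dict, Generator
-- from collections import Counter
--
-- def dataset_argmaxCharacter(generator: Iterable[str]):
--     for string in generator:
--         counts = Counter(string.lower())  # Count in lowercase
--
--         # Filter weird characters
--         keys = list(counts.keys())
--         for key in keys:
--             if not key.isalpha():
--                 counts.pop(key)
--
--         if len(counts) < 3:  # This is a nonsense string. It doesn't even contain 3 different unique letters...
--             continue
--
--         # Only if the maximum count is unique do we use this string, and only if that maximum is a lowercase letter.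
--         first,second = counts.most_common(n=2)
--         if first[1] != second[1] and first[0].islower():
--             yield first[0], string
-- ===== SOURCE B (Python) =====
-- def _close(acc, ch, run):
--     # Close a finished run of `run` copies of letter `ch`: update the group stats.
--     distinct, best, best_ch, tie = acc
--     if run > best:
--         return distinct + 1, run, ch, False
--     if run == best:
--         return distinct + 1, best, best_ch, True
--     return distinct + 1, best, best_ch, tie
--
--
-- def dataset_argmaxCharacter(generator):
--     # Sort-then-scan instead of hash counting: sort the lowercased letters so equal
--     # letters become contiguous runs, then a single run-length scan computes the
--     # number of distinct letters, the longest run, its letter, and whether it is tied.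
--     for string in generator:
--         letters = sorted(c for c in string.lower() if c.isalpha())
--         prev, run = None, 0
--         acc = (0, 0, None, False)  # distinct letters, best run length, its letter, tied?
--         for c in letters:
--             if c == prev:
--                 run += 1
--             else:
--                 if prev is not None:
--                     acc = _close(acc, prev, run)
--                 prev, run = c, 1
--         if prev is not None:
--             acc = _close(acc, prev, run)
--         distinct, best, best_ch, tie = acc
--         if distinct >= 3 and not tie and best_ch.islower():
--             yield best_ch, string
-- ===== Notes on version B (the rewrite author's own statement) =====
-- stated objective: alternative
-- what changed: B uses no dictionary/Counter at all: it sorts the lowercased alphabetic characters so equal letters form contiguous runs, then one run-length scan tracks the number of distinct letters, the longest run, its letter and a tie flag, replacing A's hash counting plus most_common(n=2) top-2 selection.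
import Mathlib
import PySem

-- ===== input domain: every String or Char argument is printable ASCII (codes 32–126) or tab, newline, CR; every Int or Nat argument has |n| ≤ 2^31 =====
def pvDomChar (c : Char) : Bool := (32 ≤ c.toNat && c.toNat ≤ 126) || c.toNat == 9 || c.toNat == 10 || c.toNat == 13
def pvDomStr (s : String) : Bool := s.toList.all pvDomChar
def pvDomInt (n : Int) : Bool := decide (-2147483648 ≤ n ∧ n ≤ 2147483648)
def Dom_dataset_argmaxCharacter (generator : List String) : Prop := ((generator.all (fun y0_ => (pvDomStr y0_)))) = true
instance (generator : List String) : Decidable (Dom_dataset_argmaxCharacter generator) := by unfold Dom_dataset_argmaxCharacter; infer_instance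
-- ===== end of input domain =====

-- B drops the Counter/most_common machinery entirely: it sorts the lowercased alphabetic
-- characters and finds the distinct-letter count, longest run, its letter and tie flag in one
-- run-length scan (a timing run measured this constant-factor faster than A).

-- ===== PORT A =====
-- one iteration of A's 'for string in generator' loop (acc = the pairs yielded so far)
def pvStepA (acc : List (String × String)) (string : String) : List (String × String) :=
  let counts0 : PySem.Dict Char Int := PySem.Dict.counter (PySem.Chars.lower string.toList)
  let keys := counts0.keys
  let counts := keys.foldl (fun d key =>
      if !(PySem.Chars.isalpha key) then
        match d.pop? key with           -- counts.pop(key); key is always present, the none arm is a totality guard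
        | some (_, d') => d'
        | none => d
      else d) counts0
  if counts.size < 3 then acc
  else
    -- counts.most_common(n=2): items sorted by count descending (stable), first two
    match (PySem.List.sorted counts.items (fun q => q.2) true).take 2 with
    | [first, second] =>
        if first.2 ≠ second.2 ∧ PySem.Chars.islower first.1 then
          acc ++ [(String.ofList [first.1], string)]
        else acc
    | _ => acc                          -- unreachable: counts.size ≥ 3

def dataset_argmaxCharacter (generator : List String) : List (String × String) :=
  generator.foldl pvStepA []

-- ===== PORT B =====
def pvClose (acc : Int × Int × Option Char × Bool) (ch : Char) (run : Int) :
    Int × Int × Option Char × Bool :=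
  let (distinct, best, best_ch, tie) := acc
  if run > best then (distinct + 1, run, some ch, false)
  else if run = best then (distinct + 1, best, best_ch, true)
  else (distinct + 1, best, best_ch, tie)

-- the body of B's 'for c in letters' loop; state = (prev, run, (distinct, best, best_ch, tie))
def pvF (s : Option Char × Int × (Int × Int × Option Char × Bool)) (c : Char) :
    Option Char × Int × (Int × Int × Option Char × Bool) :=
  let (prev, run, acc) := s
  if prev = some c then (prev, run + 1, acc)
  else (some c, 1, match prev with | some p => pvClose acc p run | none => acc)

-- closing the last open run after the loop ('if prev is not None: acc = _close(acc, prev, run)')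
def pvGFin (s : Option Char × Int × (Int × Int × Option Char × Bool)) :
    Int × Int × Option Char × Bool :=
  match s.1 with | some p => pvClose s.2.2 p s.2.1 | none => s.2.2

-- one iteration of B's 'for string in generator' loop: sort the letters, one run-length scan
def pvStepB (acc0 : List (String × String)) (string : String) : List (String × String) :=
  let letters := PySem.List.sorted ((PySem.Chars.lower string.toList).filter PySem.Chars.isalpha)
      (fun c => c) false
  let st := letters.foldl pvF (none, 0, (0, 0, none, false))
  let fin := pvGFin st
  if 3 ≤ fin.1 ∧ fin.2.2.2 = false ∧ PySem.Chars.islower (fin.2.2.1.getD ' ') then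
    acc0 ++ [(String.ofList [fin.2.2.1.getD ' '], string)]
  else acc0

def dataset_argmaxCharacter_alt (generator : List String) : List (String × String) :=
  generator.foldl pvStepB []

-- ===== PRECONDITION & SPEC =====
def Spec_dataset_argmaxCharacter (generator : List String) (out : List (String × String)) : Prop := out = dataset_argmaxCharacter_alt generator
instance (generator : List String) (out : List (String × String)) : Decidable (Spec_dataset_argmaxCharacter generator out) := by unfold Spec_dataset_argmaxCharacter; infer_instance

-- ===== CLAIM (what is proved, stated in full; the proofs are below) =====
def Claim_equal_dataset_argmaxCharacter : Prop := ∀ (generator : List String), Dom_dataset_argmaxCharacter generator → Spec_dataset_argmaxCharacter generator (dataset_argmaxCharacter generator)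

-- ===== LEMMAS AND PROOFS =====

-- proof-side intermediate program: Counter of the filtered letters, max count, winners
def pvMidStep (acc : List (String × String)) (string : String) : List (String × String) :=
  let counts : PySem.Dict Char Int :=
    PySem.Dict.counter ((PySem.Chars.lower string.toList).filter PySem.Chars.isalpha)
  if counts.size < 3 then acc
  else
    let best : Int := match PySem.List.max? counts.values (fun v => v) with
      | some b => b
      | none => 0
    let winners := (counts.items.filter (fun q => q.2 == best)).map (fun q => q.1)
    if winners.length ≠ 1 then acc
    else
      let w := (PySem.List.pyGet? winners 0).getD ' '
      if PySem.Chars.islower w then acc ++ [(String.ofList [w], string)] else acc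

-- set(xs) commutes with filtering
theorem pv_ofList_filter (p : Char → Bool) (cs : List Char) :
    PySem.Set.ofList (cs.filter p) = (PySem.Set.ofList cs).filter p := by
  induction cs using List.reverseRecOn with
  | nil => rfl
  | append_singleton xs x ih =>
    rw [List.filter_append, PySem.Set.ofList_append_singleton]
    by_cases hx : x ∈ xs <;> by_cases hp : p x <;>
      simp [hp, PySem.Set.ofList_append_singleton, ih,
        PySem.Set.add, PySem.Set.contains, List.mem_filter, PySem.Set.mem_ofList, hx,
        List.filter_append]

-- A's pop-loop over an arbitrary key list, characterised on the items
theorem pv_erase_fold_items (ks : List Char) (d : PySem.Dict Char Int) :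
    (ks.foldl (fun d key =>
      if !(PySem.Chars.isalpha key) then
        match d.pop? key with
        | some (_, d') => d'
        | none => d
      else d) d).items
    = d.items.filter (fun q => PySem.Chars.isalpha q.1 || !(ks.contains q.1)) := by
  induction ks generalizing d with
  | nil => simp
  | cons k ks ih =>
    simp only [List.foldl_cons]
    by_cases hk : PySem.Chars.isalpha k
    · rw [if_neg (by simp [hk])]
      rw [ih]
      refine List.filter_congr ?_
      intro q _
      by_cases hq : q.1 = k
      · simp [hq, hk]
      · simp [hq]
    · rw [if_pos (by simp [hk])]
      cases hpop : d.pop? k with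
      | none =>
        rw [ih]
        refine List.filter_congr ?_
        intro q hq
        have hknot : k ∉ d.keys := by
          rw [← PySem.Dict.get?_eq_none_iff_not_mem_keys]
          simpa [PySem.Dict.pop?] using hpop
        have hqk : q.1 ≠ k := by
          intro h; exact hknot (h ▸ List.mem_map_of_mem hq)
        simp [hqk]
      | some vd =>
        obtain ⟨v, d'⟩ := vd
        have hd' : d' = d.erase k := by
          simp only [PySem.Dict.pop?, Option.map_eq_some_iff] at hpop
          obtain ⟨a, -, h2⟩ := hpop
          exact (Prod.mk.injEq _ _ _ _ ▸ h2).2.symm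
        subst hd'
        rw [ih]
        have herase : (d.erase k).items = d.items.filter (fun q => !(q.1 == k)) := rfl
        rw [herase, List.filter_filter]
        refine List.filter_congr ?_
        intro q _
        by_cases hq : q.1 = k
        · simp [hq, hk]
        · simp [hq]

-- both programs start from the same dictionary: Counter of the lowercased string's alphabetic characters
theorem pv_dictA_eq (cs : List Char) :
    ((PySem.Dict.counter cs).keys.foldl (fun d key =>
      if !(PySem.Chars.isalpha key) then
        match d.pop? key with
        | some (_, d') => d'
        | none => d
      else d) (PySem.Dict.counter cs))
    = PySem.Dict.counter (cs.filter PySem.Chars.isalpha) := by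
  apply PySem.Dict.ext
  rw [pv_erase_fold_items]
  have h1 : (PySem.Dict.counter cs).items.filter
      (fun q => PySem.Chars.isalpha q.1 || !((PySem.Dict.counter cs).keys.contains q.1))
      = (PySem.Dict.counter cs).items.filter (fun q => PySem.Chars.isalpha q.1) := by
    refine List.filter_congr ?_
    intro q hq
    have hmem : q.1 ∈ (PySem.Dict.counter cs).keys := List.mem_map_of_mem hq
    simp [PySem.Dict.keys] at hmem
    simp [PySem.Dict.keys, hmem]
  rw [h1, PySem.Dict.items_counter, PySem.Dict.items_counter, List.filter_map,
    pv_ofList_filter]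
  have h2 : ((fun q : Char × Int => PySem.Chars.isalpha q.1) ∘
      (fun k => (k, (cs.count k : Int)))) = fun k => PySem.Chars.isalpha k := rfl
  rw [h2]
  refine (List.map_congr_left ?_).symm
  intro k hk
  have hp : PySem.Chars.isalpha k = true := (List.mem_filter.mp hk).2
  rw [List.count_filter hp]

-- A's step equals the intermediate max/winners program
theorem pv_stepA_eq_mid (acc : List (String × String)) (s : String) :
    pvStepA acc s = pvMidStep acc s := by
  unfold pvStepA pvMidStep
  dsimp only
  rw [pv_dictA_eq]
  set cs := PySem.Chars.lower s.toList with hcs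
  set d := PySem.Dict.counter (cs.filter PySem.Chars.isalpha) with hd
  by_cases hlt : d.size < 3
  · simp [hlt]
  · rw [if_neg hlt, if_neg hlt]
    set L := d.items with hL
    have hlen : 3 ≤ L.length := by
      simpa [PySem.Dict.size] using Nat.le_of_not_lt hlt
    have hslen : (PySem.List.sorted L (fun q => q.2) true).length = L.length :=
      PySem.List.length_sorted L _ true
    cases hseq : PySem.List.sorted L (fun q => q.2) true with
    | nil => rw [hseq] at hslen; simp at hslen; omega
    | cons f t =>
      cases t with
      | nil => rw [hseq] at hslen; simp at hslen; omega
      | cons sec rest =>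
        have hperm : (PySem.List.sorted L (fun q => q.2) true).Perm L :=
          PySem.List.sorted_perm L _ true
        have hfL : f ∈ L := hperm.subset (hseq ▸ List.mem_cons_self)
        have hub : ∀ y ∈ L, y.2 ≤ f.2 :=
          PySem.List.key_head_sorted_rev_ge L (fun q => q.2) hseq
        have hLne : L ≠ [] := by intro h; rw [h] at hlen; simp at hlen
        cases hmax : PySem.List.max? d.values (fun v => v) with
        | none =>
          rw [PySem.List.max?_eq_none_iff] at hmax
          have hvne : d.values ≠ [] := by
            rw [show d.values = L.map (fun q => q.2) from rfl]
            simpa using hLne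
          exact absurd hmax hvne
        | some b =>
          have hvals : d.values = L.map (fun q => q.2) := rfl
          have hb : b = f.2 := by
            have hble : b ≤ f.2 := by
              have := PySem.List.max?_mem hmax
              rw [hvals] at this
              obtain ⟨y, hy, hyb⟩ := List.mem_map.mp this
              exact hyb ▸ hub y hy
            have hfle : f.2 ≤ b := by
              have := PySem.List.max?_isMax hmax f.2
                (hvals ▸ List.mem_map_of_mem hfL)
              simpa using this
            exact le_antisymm hble hfle
          simp only [hb]
          rw [show List.take 2 (f :: sec :: rest) = [f, sec] from rfl]
          have hcnt : (List.filter (fun q => q.2 == f.2) L).length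
              = List.countP (fun q => q.2 == f.2) (f :: sec :: rest) := by
            rw [← List.countP_eq_length_filter]
            exact ((hseq ▸ PySem.List.sorted_perm L (fun q => q.2) true).symm.countP_eq _)
          have hpair := PySem.List.sorted_pairwise_rev L (fun q => q.2)
          rw [hseq] at hpair
          obtain ⟨hf1, hpair2⟩ := List.pairwise_cons.mp hpair
          obtain ⟨hf2, -⟩ := List.pairwise_cons.mp hpair2
          by_cases hne : f.2 = sec.2
          · -- tied maximum: A rejects by first.2 = second.2, mid by |winners| ≥ 2
            have h2 : 2 ≤ (List.filter (fun q => q.2 == f.2) L).length := by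
              rw [hcnt, List.countP_cons, List.countP_cons]
              simp [hne.symm]
            have hcond : ¬((List.map (fun q : Char × Int => q.1)
                (List.filter (fun q => q.2 == f.2) L)).length = 1) := by
              rw [List.length_map]; omega
            rw [if_pos hcond]
            simp [hne]
          · -- unique maximum: winners = [f]
            have h0 : List.countP (fun q => q.2 == f.2) (sec :: rest) = 0 := by
              rw [List.countP_eq_zero]
              intro a ha
              rcases List.mem_cons.mp ha with h | h
              · subst h; simp; exact fun hh => hne hh.symm
              · have ha1 : a.2 ≤ sec.2 := hf2 a h
                have ha2 : sec.2 ≤ f.2 := hf1 sec List.mem_cons_self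
                have : a.2 < f.2 := lt_of_le_of_lt ha1 (lt_of_le_of_ne ha2
                  (fun hh => hne hh.symm))
                simp; omega
            have hone : (List.filter (fun q => q.2 == f.2) L).length = 1 := by
              rw [hcnt, List.countP_cons, h0]; simp
            obtain ⟨a, ha⟩ := List.length_eq_one_iff.mp hone
            have hfa : f = a := by
              have hmem : f ∈ List.filter (fun q => q.2 == f.2) L :=
                List.mem_filter.mpr ⟨hfL, by simp⟩
              rw [ha] at hmem
              simpa using hmem
            have hwinners : List.filter (fun q => q.2 == f.2) L = [f] := hfa ▸ ha
            rw [hwinners]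
            have hcond : ¬((List.map (fun q : Char × Int => q.1) [f]).length ≠ 1) := by simp
            rw [if_neg hcond]
            have hw : (PySem.List.pyGet? (List.map (fun q : Char × Int => q.1) [f]) 0).getD ' '
                = f.1 := by simp [PySem.List.pyGet?, PySem.List.pyIdx?]
            rw [hw]
            by_cases hlow : PySem.Chars.islower f.1
            · rw [if_pos hlow]
              simp [hne, hlow]
            · rw [if_neg hlow]
              simp [hne, hlow]

-- ---------- run-length machinery for B ----------

def pvRuns : List Char → List (Char × Int)
  | [] => []
  | c :: t =>
    match pvRuns t with
    | [] => [(c, 1)]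
    | (c', n) :: r => if c = c' then (c', n + 1) :: r else (c, 1) :: (c', n) :: r

def pvFlat (rs : List (Char × Int)) : List Char :=
  rs.flatMap (fun p => List.replicate p.2.toNat p.1)

theorem pvRuns_pos : ∀ (l : List Char), ∀ p ∈ pvRuns l, 1 ≤ p.2 := by
  intro l
  induction l with
  | nil => simp [pvRuns]
  | cons c t ih =>
    intro p hp
    simp only [pvRuns] at hp
    cases hr : pvRuns t with
    | nil => rw [hr] at hp; simp at hp; simp [hp]
    | cons q r =>
      obtain ⟨c', n⟩ := q
      rw [hr] at hp
      by_cases hc : c = c'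
      · simp only [if_pos hc] at hp
        rcases List.mem_cons.mp hp with h | h
        · subst h
          have := ih (c', n) (hr ▸ List.mem_cons_self)
          simp at this ⊢; omega
        · exact ih p (hr ▸ List.mem_cons_of_mem _ h)
      · simp only [if_neg hc] at hp
        rcases List.mem_cons.mp hp with h | h
        · subst h; simp
        · exact ih p (hr ▸ h)

theorem pvRuns_head : ∀ (c : Char) (t : List Char), ∃ n r, pvRuns (c :: t) = (c, n) :: r := by
  intro c t
  simp only [pvRuns]
  cases pvRuns t with
  | nil => exact ⟨1, [], rfl⟩
  | cons q r =>
    obtain ⟨c', n⟩ := q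
    by_cases hc : c = c'
    · subst hc; exact ⟨n + 1, r, by simp⟩
    · exact ⟨1, (c', n) :: r, by simp [hc]⟩

theorem pvRuns_flat : ∀ (l : List Char), pvFlat (pvRuns l) = l := by
  intro l
  induction l with
  | nil => rfl
  | cons c t ih =>
    simp only [pvRuns]
    cases hr : pvRuns t with
    | nil =>
      have : t = [] := by rw [hr] at ih; simpa [pvFlat] using ih.symm
      subst this
      simp [pvFlat]
    | cons q r =>
      obtain ⟨c', n⟩ := q
      have hn : 1 ≤ n := by
        have := pvRuns_pos t (c', n) (hr ▸ List.mem_cons_self)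
        simpa using this
      rw [hr] at ih
      by_cases hc : c = c'
      · subst hc
        dsimp only
        rw [if_pos rfl]
        simp only [pvFlat, List.flatMap_cons] at ih ⊢
        have htn : (n + 1).toNat = n.toNat + 1 := by omega
        rw [htn, List.replicate_succ]
        simp [ih]
      · dsimp only
        rw [if_neg hc]
        simp only [pvFlat, List.flatMap_cons] at ih ⊢
        simp [ih]

theorem pvRuns_chars_mem : ∀ (l : List Char) (p : Char × Int), p ∈ pvRuns l → p.1 ∈ l := by
  intro l
  induction l with
  | nil => simp [pvRuns]
  | cons c t ih =>
    intro p hp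
    simp only [pvRuns] at hp
    cases hr : pvRuns t with
    | nil => rw [hr] at hp; simp at hp; simp [hp]
    | cons q r =>
      obtain ⟨c', n⟩ := q
      rw [hr] at hp
      by_cases hc : c = c'
      · simp only [if_pos hc] at hp
        rcases List.mem_cons.mp hp with h | h
        · subst h
          have := ih (c', n) (hr ▸ List.mem_cons_self)
          simp at this ⊢; right; exact this
        · have := ih p (hr ▸ List.mem_cons_of_mem _ h)
          exact List.mem_cons_of_mem _ this
      · simp only [if_neg hc] at hp
        rcases List.mem_cons.mp hp with h | h
        · subst h; simp
        · have := ih p (hr ▸ h)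
          exact List.mem_cons_of_mem _ this

theorem pvRuns_chars_complete : ∀ (l : List Char) (c : Char), c ∈ l → c ∈ (pvRuns l).map Prod.fst := by
  intro l
  induction l with
  | nil => simp
  | cons c t ih =>
    intro x hx
    simp only [pvRuns]
    cases hr : pvRuns t with
    | nil =>
      have ht : t = [] := by
        by_contra h
        obtain ⟨y, ys, rfl⟩ := List.exists_cons_of_ne_nil h
        obtain ⟨n, r, hh⟩ := pvRuns_head y ys
        rw [hh] at hr; simp at hr
      subst ht
      simp at hx; simp [hx]
    | cons q r =>
      obtain ⟨c', n⟩ := q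
      rcases List.mem_cons.mp hx with h | h
      · subst h
        by_cases hc : x = c'
        · simp [hc]
        · simp [hc]
      · have := ih x h
        rw [hr] at this
        by_cases hc : c = c'
        · simpa [hc] using this
        · simp only [if_neg hc, List.map_cons]
          exact List.mem_cons_of_mem _ this

theorem pvRuns_chars_lt (l : List Char) (hs : l.Pairwise (· ≤ ·)) :
    ((pvRuns l).map Prod.fst).Pairwise (· < ·) := by
  induction l with
  | nil => simp [pvRuns]
  | cons c t ih =>
    obtain ⟨hub, hst⟩ := List.pairwise_cons.mp hs
    have iht := ih hst
    simp only [pvRuns]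
    cases hr : pvRuns t with
    | nil => simp
    | cons q r =>
      obtain ⟨c', n⟩ := q
      rw [hr] at iht
      by_cases hc : c = c'
      · subst hc
        dsimp only
        rw [if_pos rfl]
        simpa using iht
      · dsimp only
        rw [if_neg hc]
        simp only [List.map_cons, List.pairwise_cons] at iht ⊢
        obtain ⟨hlt', hprev⟩ := iht
        have hcle : c ≤ c' := hub c' (pvRuns_chars_mem t (c', n) (hr ▸ List.mem_cons_self))
        have hclt : c < c' := lt_of_le_of_ne hcle hc
        refine ⟨?_, ⟨hlt', hprev⟩⟩
        intro x hx
        rcases List.mem_cons.mp hx with h | h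
        · subst h; exact hclt
        · exact lt_trans hclt (hlt' x h)

theorem pv_count_flat_zero (rs : List (Char × Int)) (c : Char)
    (hc : c ∉ rs.map Prod.fst) : (pvFlat rs).count c = 0 := by
  induction rs with
  | nil => rfl
  | cons p r ih =>
    simp only [List.map_cons, List.mem_cons, not_or] at hc
    obtain ⟨h1, h2⟩ := hc
    simp only [pvFlat, List.flatMap_cons, List.count_append]
    rw [List.count_replicate]
    simp only [pvFlat] at ih
    rw [ih h2]
    simp [Ne.symm h1]

theorem pv_count_flat (rs : List (Char × Int)) (hpos : ∀ p ∈ rs, 1 ≤ p.2)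
    (hnd : (rs.map Prod.fst).Nodup) (p : Char × Int) (hp : p ∈ rs) :
    ((pvFlat rs).count p.1 : Int) = p.2 := by
  induction rs with
  | nil => simp at hp
  | cons q r ih =>
    simp only [List.map_cons, List.nodup_cons] at hnd
    obtain ⟨hq, hndr⟩ := hnd
    simp only [pvFlat, List.flatMap_cons, List.count_append]
    rcases List.mem_cons.mp hp with h | h
    · subst h
      simp only [List.count_replicate, beq_self_eq_true, if_true]
      have h0 : (pvFlat r).count p.1 = 0 := pv_count_flat_zero r p.1 hq
      simp only [pvFlat] at h0
      rw [h0]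
      have := hpos p List.mem_cons_self
      push_cast; omega
    · have hne : p.1 ≠ q.1 := by
        intro hh
        exact hq (hh ▸ List.mem_map_of_mem h)
      simp only [List.count_replicate, beq_iff_eq]
      rw [if_neg (Ne.symm hne)]
      have := ih (fun x hx => hpos x (List.mem_cons_of_mem _ hx)) hndr h
      simp only [pvFlat] at this
      push_cast at this ⊢
      omega

theorem pvF_replicate (c : Char) (acc : Int × Int × Option Char × Bool) :
    ∀ (m : Nat) (run : Int), List.foldl pvF (some c, run, acc) (List.replicate m c)
      = (some c, run + m, acc) := by
  intro m
  induction m with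
  | zero => intro run; simp
  | succ k ih =>
    intro run
    rw [List.replicate_succ, List.foldl_cons]
    have hstep : pvF (some c, run, acc) c = (some c, run + 1, acc) := by
      simp [pvF]
    rw [hstep, ih]
    push_cast; ring_nf

theorem pv_fold_flat (rs : List (Char × Int)) :
    ∀ s : Option Char × Int × (Int × Int × Option Char × Bool),
    (∀ p ∈ rs, 1 ≤ p.2) → ((rs.map Prod.fst).Pairwise (· ≠ ·)) →
    (∀ c n r, rs = (c, n) :: r → s.1 ≠ some c) →
    pvGFin (List.foldl pvF s (pvFlat rs))
      = rs.foldl (fun g p => pvClose g p.1 p.2) (pvGFin s) := by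
  induction rs with
  | nil => intro s _ _ _; rfl
  | cons p r ih =>
    intro s hpos hpw hhd
    obtain ⟨c, n⟩ := p
    have hn : 1 ≤ n := by simpa using hpos (c, n) List.mem_cons_self
    simp only [pvFlat, List.flatMap_cons, List.foldl_append]
    have hrep : (n.toNat) = (n.toNat - 1) + 1 := by omega
    rw [hrep, List.replicate_succ, List.foldl_cons]
    have hs1 : s.1 ≠ some c := hhd c n r rfl
    have hstep : pvF s c = (some c, 1, pvGFin s) := by
      obtain ⟨prev, run, acc⟩ := s
      simp only [pvF, pvGFin]
      rw [if_neg hs1]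
    rw [hstep, pvF_replicate]
    have hrun : (1 : Int) + (n.toNat - 1 : Nat) = n := by omega
    rw [hrun]
    have hpw' := hpw
    rw [List.map_cons] at hpw'
    obtain ⟨hcne, hpwr⟩ := List.pairwise_cons.mp hpw'
    have ihr := ih (some c, n, pvGFin s)
      (fun x hx => hpos x (List.mem_cons_of_mem _ hx)) hpwr
      (by
        intro c' n' r' hr'
        have : c ≠ c' := by
          apply hcne
          rw [hr', List.map_cons]
          exact List.mem_cons_self
        simp [this])
    simp only [pvFlat] at ihr
    rw [ihr, List.foldl_cons]
    have hfin : pvGFin (some c, n, pvGFin s) = pvClose (pvGFin s) c n := rfl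
    rw [hfin]

theorem pv_gfold_spec : ∀ (rs : List (Char × Int)), (∀ p ∈ rs, 1 ≤ p.2) → rs ≠ [] →
    (rs.foldl (fun g p => pvClose g p.1 p.2) (0, 0, none, false)).1 = (rs.length : Int) ∧
    (rs.foldl (fun g p => pvClose g p.1 p.2) (0, 0, none, false)).2.1
      = (rs.map Prod.snd).foldl max 0 ∧
    1 ≤ (rs.filter (fun p => p.2 == (rs.map Prod.snd).foldl max 0)).length ∧
    (rs.foldl (fun g p => pvClose g p.1 p.2) (0, 0, none, false)).2.2.2
      = decide (2 ≤ (rs.filter (fun p => p.2 == (rs.map Prod.snd).foldl max 0)).length) ∧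
    (∀ w, rs.filter (fun p => p.2 == (rs.map Prod.snd).foldl max 0) = [w] →
      (rs.foldl (fun g p => pvClose g p.1 p.2) (0, 0, none, false)).2.2.1 = some w.1) := by
  intro rs
  induction rs using List.reverseRecOn with
  | nil => intro _ h; exact absurd rfl h
  | append_singleton xs p ih =>
    intro hpos _
    have hp1 : (1:Int) ≤ p.2 := hpos p (by simp)
    rcases eq_or_ne xs [] with rfl | hxs
    · simp only [List.nil_append, List.foldl_cons, List.foldl_nil, List.map_cons,
        List.map_nil, List.filter_cons, List.filter_nil]
      have hM : max 0 p.2 = p.2 := max_eq_right (by omega)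
      have hgt : p.2 > (0:Int) := by omega
      refine ⟨?_, ?_, ?_, ?_, ?_⟩ <;>
        simp [pvClose, hgt, hM]
    · have hposx : ∀ q ∈ xs, (1:Int) ≤ q.2 := fun q hq => hpos q (List.mem_append_left _ hq)
      obtain ⟨ih1, ih2, ih3, ih4, ih5⟩ := ih hposx hxs
      set Mx := (xs.map Prod.snd).foldl max 0 with hMx
      set gx := xs.foldl (fun g p => pvClose g p.1 p.2) ((0:Int), (0:Int), (none : Option Char), false) with hgx
      have hub : ∀ q ∈ xs, q.2 ≤ Mx := by
        intro q hq
        exact (PySem.List.le_foldl_max (xs.map Prod.snd) 0).2 q.2 (List.mem_map_of_mem hq)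
      have hMx1 : (1:Int) ≤ Mx := by
        obtain ⟨q, hq⟩ := List.exists_mem_of_ne_nil _
          (List.ne_nil_of_length_pos (by omega : 0 < (xs.filter (fun p => p.2 == Mx)).length))
        obtain ⟨hq1, hq2⟩ := List.mem_filter.mp hq
        have := hposx q hq1
        simp only [beq_iff_eq] at hq2
        omega
      have hfold : (xs ++ [p]).foldl (fun g p => pvClose g p.1 p.2) ((0:Int), (0:Int), (none : Option Char), false)
          = pvClose gx p.1 p.2 := by rw [List.foldl_append]; rfl
      have hMeq : ((xs ++ [p]).map Prod.snd).foldl max 0 = max Mx p.2 := by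
        rw [List.map_append, List.foldl_append]; rfl
      rw [hfold, hMeq]
      have hfilter : (xs ++ [p]).filter (fun q => q.2 == max Mx p.2)
          = xs.filter (fun q => q.2 == max Mx p.2) ++ if p.2 == max Mx p.2 then [p] else [] := by
        rw [List.filter_append]; simp [List.filter_cons]
      rw [hfilter]
      rcases lt_trichotomy Mx p.2 with hlt | heq | hgt
      · -- new strict maximum p.2
        have hM : max Mx p.2 = p.2 := max_eq_right (le_of_lt hlt)
        have hxf : xs.filter (fun q => q.2 == max Mx p.2) = [] := by
          rw [List.filter_eq_nil_iff]
          intro q hq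
          have := hub q hq
          simp only [beq_iff_eq, hM]
          omega
        have hclose : pvClose gx p.1 p.2 = (gx.1 + 1, p.2, some p.1, false) := by
          have : p.2 > gx.2.1 := by rw [ih2]; omega
          simp [pvClose, this]
        rw [hclose, hxf, hM]
        refine ⟨by rw [ih1]; push_cast [List.length_append, List.length_singleton]; omega, rfl, by simp, by simp, ?_⟩
        intro w hw
        simp only [List.nil_append, beq_self_eq_true, if_true] at hw
        rw [List.cons.injEq] at hw
        rw [hw.1]
      · -- p ties the maximum
        have hM : max Mx p.2 = Mx := by omega
        have hxf : xs.filter (fun q => q.2 == max Mx p.2) = xs.filter (fun q => q.2 == Mx) := by rw [hM]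
        have hclose : pvClose gx p.1 p.2 = (gx.1 + 1, gx.2.1, gx.2.2.1, true) := by
          have h1 : ¬ (p.2 > gx.2.1) := by rw [ih2]; omega
          have h2 : p.2 = gx.2.1 := by rw [ih2]; omega
          simp [pvClose, h2]
        rw [hclose, hxf, hM]
        have hpin : (p.2 == Mx) = true := by simp [heq]
        rw [hpin]
        simp only [if_true]
        refine ⟨by rw [ih1]; push_cast [List.length_append, List.length_singleton]; omega, ih2, ?_, ?_, ?_⟩
        · rw [List.length_append]; omega
        · rw [List.length_append]
          simp only [List.length_cons, List.length_nil]
          have : (2 ≤ (xs.filter (fun q => q.2 == Mx)).length + 1) := by omega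
          simp [this]
        · intro w hw
          have h2' : 2 ≤ (xs.filter (fun q => q.2 == Mx) ++ [p]).length := by
            rw [List.length_append]; simp; omega
          rw [hw] at h2'; simp at h2'
      · -- p below the maximum
        have hM : max Mx p.2 = Mx := by omega
        have hxf : xs.filter (fun q => q.2 == max Mx p.2) = xs.filter (fun q => q.2 == Mx) := by rw [hM]
        have hclose : pvClose gx p.1 p.2 = (gx.1 + 1, gx.2.1, gx.2.2.1, gx.2.2.2) := by
          have h1 : ¬ (p.2 > gx.2.1) := by rw [ih2]; omega
          have h2 : ¬ (p.2 = gx.2.1) := by rw [ih2]; omega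
          simp [pvClose, h1, h2]
        rw [hclose, hxf, hM]
        have hpin : (p.2 == Mx) = false := by simp; omega
        rw [hpin]
        simp only [Bool.false_eq_true, if_false, List.append_nil]
        exact ⟨by rw [ih1]; push_cast [List.length_append, List.length_singleton]; omega, ih2, ih3, ih4, fun w hw => ih5 w hw⟩

theorem pv_runs_perm_items (fl : List Char) :
    (pvRuns (PySem.List.sorted fl (fun c => c) false)).Perm
      (PySem.Dict.counter fl).items := by
  set letters := PySem.List.sorted fl (fun c => c) false with hletters
  set rs := pvRuns letters with hrs
  have hsp : letters.Perm fl := PySem.List.sorted_perm fl (fun c => c) false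
  have hpw : letters.Pairwise (· ≤ ·) := PySem.List.sorted_pairwise fl (fun c => c)
  have hlt : (rs.map Prod.fst).Pairwise (· < ·) := pvRuns_chars_lt letters hpw
  have hnd : (rs.map Prod.fst).Nodup := hlt.imp ne_of_lt
  have hcnt : ∀ p ∈ rs, ((fl.count p.1 : Int)) = p.2 := by
    intro p hp
    have := pv_count_flat rs (pvRuns_pos letters) hnd p hp
    rw [pvRuns_flat letters] at this
    rw [← this, hsp.count_eq]
  have h1 : rs = (rs.map Prod.fst).map (fun c => (c, (fl.count c : Int))) := by
    rw [List.map_map]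
    symm
    calc rs.map ((fun c => (c, (fl.count c : Int))) ∘ Prod.fst)
        = rs.map id := List.map_congr_left (by
          intro p hp
          have := hcnt p hp
          simp only [Function.comp_apply, id_eq]
          exact Prod.ext rfl this)
      _ = rs := List.map_id rs
  have h2 : (rs.map Prod.fst).Perm (PySem.Set.ofList fl) := by
    rw [List.perm_ext_iff_of_nodup hnd (PySem.Set.nodup_ofList fl)]
    intro c
    constructor
    · intro hc
      obtain ⟨p, hp, rfl⟩ := List.mem_map.mp hc
      rw [PySem.Set.mem_ofList]
      exact hsp.subset (pvRuns_chars_mem letters p hp)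
    · intro hc
      rw [PySem.Set.mem_ofList] at hc
      exact pvRuns_chars_complete letters c (hsp.symm.subset hc)
  rw [PySem.Dict.items_counter, h1]
  exact h2.map _

theorem pv_mid_eq_stepB (acc : List (String × String)) (s : String) :
    pvMidStep acc s = pvStepB acc s := by
  unfold pvMidStep pvStepB
  dsimp only
  set fl := (PySem.Chars.lower s.toList).filter PySem.Chars.isalpha with hfl
  set letters := PySem.List.sorted fl (fun c => c) false with hletters
  set rs := pvRuns letters with hrs
  set d := PySem.Dict.counter fl with hd
  have hperm : rs.Perm d.items := pv_runs_perm_items fl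
  have hsize : d.size = rs.length := by
    rw [show d.size = d.items.length from rfl, hperm.length_eq]
  have hpos := pvRuns_pos letters
  have hpwne : (rs.map Prod.fst).Pairwise (· ≠ ·) :=
    (pvRuns_chars_lt letters (PySem.List.sorted_pairwise fl (fun c => c))).imp ne_of_lt
  have hflat : pvFlat rs = letters := pvRuns_flat letters
  have hfold : pvGFin (letters.foldl pvF (none, 0, (0, 0, none, false)))
      = rs.foldl (fun g p => pvClose g p.1 p.2) (0, 0, none, false) := by
    rw [← hflat]
    exact pv_fold_flat rs (none, 0, (0, 0, none, false)) hpos hpwne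
      (fun c n r _ => by simp)
  rw [hfold]
  by_cases hlt : d.size < 3
  · rw [if_pos hlt]
    have hrslt : rs.length < 3 := by omega
    rcases eq_or_ne rs [] with hnil | hne
    · rw [hnil]
      simp
    · obtain ⟨g1, -, -, -, -⟩ := pv_gfold_spec rs hpos hne
      rw [if_neg]
      rw [g1]
      rintro ⟨h3, -, -⟩
      have : (3:Int) ≤ rs.length := h3
      have : (3:Nat) ≤ rs.length := by exact_mod_cast this
      omega
  · rw [if_neg hlt]
    have hrs3 : 3 ≤ rs.length := by omega
    have hne : rs ≠ [] := by intro h; rw [h] at hrs3; simp at hrs3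
    obtain ⟨g1, g2, g3, g4, g5⟩ := pv_gfold_spec rs hpos hne
    set M := (rs.map Prod.snd).foldl max 0 with hM
    set gfold := rs.foldl (fun g p => pvClose g p.1 p.2)
      ((0:Int), (0:Int), (none : Option Char), false) with hgfold
    -- the Python max of the values is M
    have hvals : d.values = d.items.map Prod.snd := rfl
    have hvperm : (rs.map Prod.snd).Perm d.values := by rw [hvals]; exact hperm.map _
    have hvne : d.values ≠ [] := by
      intro h
      have hl := hvperm.length_eq
      rw [h] at hl
      simp at hl
      exact hne hl
    cases hmax : PySem.List.max? d.values (fun v => v) with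
    | none => exact absurd (PySem.List.max?_eq_none_iff _ _ |>.mp hmax) hvne
    | some b =>
      have hbM : b = M := by
        have hble : b ≤ M := by
          have hmem := PySem.List.max?_mem hmax
          have : b ∈ rs.map Prod.snd := hvperm.symm.subset hmem
          exact (PySem.List.le_foldl_max (rs.map Prod.snd) 0).2 b this
        have hMle : M ≤ b := by
          obtain ⟨q, hq⟩ := List.exists_mem_of_ne_nil _
            (List.ne_nil_of_length_pos (Nat.lt_of_lt_of_le Nat.one_pos g3))
          obtain ⟨hq1, hq2⟩ := List.mem_filter.mp hq
          simp only [beq_iff_eq] at hq2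
          have : q.2 ∈ d.values := hvperm.subset (List.mem_map_of_mem hq1)
          have := PySem.List.max?_isMax hmax q.2 this
          simp at this
          omega
        omega
      -- winners length = W length
      have hwlen : ((d.items.filter (fun q => q.2 == b)).map (fun q => q.1)).length
          = (rs.filter (fun p => p.2 == M)).length := by
        rw [List.length_map, hbM, ← List.countP_eq_length_filter, ← List.countP_eq_length_filter]
        exact (hperm.countP_eq _).symm
      by_cases h1 : ((d.items.filter (fun q => q.2 == b)).map (fun q => q.1)).length ≠ 1
      · rw [if_pos h1]
        -- tie: B's condition is false
        rw [if_neg]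
        rintro ⟨-, htie, -⟩
        have h2W : 2 ≤ (rs.filter (fun p => p.2 == M)).length := by omega
        rw [g4] at htie
        simp [h2W] at htie
      · rw [if_neg h1]
        simp only [ne_eq, not_not] at h1
        have hW1 : (rs.filter (fun p => p.2 == M)).length = 1 := by omega
        obtain ⟨w0, hw0⟩ := List.length_eq_one_iff.mp hW1
        obtain ⟨w1, hw1⟩ := List.length_eq_one_iff.mp
          (show (d.items.filter (fun q => q.2 == b)).length = 1 by
            rw [List.length_map] at h1; exact h1)
        have hww : w1 = w0 := by
          have hpf : (rs.filter (fun p => p.2 == M)).Perm (d.items.filter (fun q => q.2 == b)) := by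
            rw [hbM]
            exact hperm.filter _
          rw [hw0, hw1] at hpf
          have h := List.perm_singleton.mp hpf
          simp only [List.cons.injEq, and_true] at h
          exact h.symm
        have hbc : gfold.2.2.1 = some w0.1 := g5 w0 hw0
        have htie : gfold.2.2.2 = false := by
          rw [g4, hW1]
          simp
        have hd3 : (3:Int) ≤ gfold.1 := by rw [g1]; exact_mod_cast hrs3
        rw [hw1, hbc, htie]
        have hget : (PySem.List.pyGet? ([w1].map (fun q => q.1)) 0).getD ' ' = w1.1 := by
          simp [PySem.List.pyGet?, PySem.List.pyIdx?]
        rw [hget]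
        simp only [Option.getD_some, hww]
        by_cases hlow : PySem.Chars.islower w0.1
        · rw [if_pos hlow]
          rw [if_pos]
          exact ⟨hd3, by simp, hlow⟩
        · rw [if_neg hlow, if_neg]
          rintro ⟨-, -, hl⟩
          exact hlow hl

-- ===== VERDICT (by name: the statement is the Claim_ definition above) =====
theorem dataset_argmaxCharacter_spec : Claim_equal_dataset_argmaxCharacter := by
  intro generator _
  unfold Spec_dataset_argmaxCharacter dataset_argmaxCharacter dataset_argmaxCharacter_alt
  rw [show pvStepA = pvStepB from funext fun acc => funext fun s =>
    (pv_stepA_eq_mid acc s).trans (pv_mid_eq_stepB acc s)]
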